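-- pv_equiv track=rewrite | github.com/joohnes/stuff | licz.py | licz
-- ===== SOURCE A (Python) =====
-- def licz(x):
--     if x == 1:
--         return 1
--     else:
--         w = licz(x//2)
--         if (x % 2) == 1:
--             return w + 1
--         else:
--             return w - 1
-- ===== SOURCE B (Python) =====
-- def licz(x):
--     # licz(x) = (#1-bits) - (#0-bits) of x's binary expansion = 2*ones - bits
--     ones = 0
--     y = x
--     while y >= 1:
--         ones += y % 2
--         y //= 2
--     bits = 0
--     y = x
--     while y >= 1:
--         bits += 1
--         y //= 2
--     return 2 * ones - bits
-- ===== Notes on version B (the rewrite author's own statement) =====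
-- stated objective: alternative
-- what changed: Replaced A's recursive +/-1 walk by the closed-form combination 2*popcount(x) - bit_length(x), computed by two separate iterative passes over the bits.
import Mathlib
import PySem

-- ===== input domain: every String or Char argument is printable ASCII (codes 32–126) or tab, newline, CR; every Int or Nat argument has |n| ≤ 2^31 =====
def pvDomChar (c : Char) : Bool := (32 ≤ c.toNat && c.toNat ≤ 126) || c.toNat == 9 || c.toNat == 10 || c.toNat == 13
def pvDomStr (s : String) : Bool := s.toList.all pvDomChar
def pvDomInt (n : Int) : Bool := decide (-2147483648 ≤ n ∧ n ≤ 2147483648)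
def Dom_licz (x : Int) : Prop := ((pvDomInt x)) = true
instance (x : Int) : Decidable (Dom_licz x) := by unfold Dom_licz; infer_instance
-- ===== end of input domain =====

-- B replaces A's recursive +/-1 walk by the identity licz(x) = 2*ones(x) - bits(x),
-- with ones (popcount) and bits (bit length) computed in two separate iterative passes.

-- ===== PORT A =====
-- Port of A's recursion; the `x ≤ 0` guard only makes the recursion total in Lean
-- (Python A never terminates there: RecursionError; excluded by Pre_licz).
def licz (x : Int) : Int :=
  if x = 1 then 1
  else if _h : x ≤ 0 then 0
  else
    let w := licz (PySem.Int.floordiv x 2)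
    if PySem.Int.mod x 2 = 1 then w + 1 else w - 1
termination_by x.toNat
decreasing_by
  have h2 : PySem.Int.floordiv x 2 = x / 2 := PySem.Int.floordiv_eq_ediv_of_pos (by omega)
  rw [h2]; omega

-- ===== PORT B =====
-- first pass of Source B: sum of the low bits (popcount)
def liczOnes (y acc : Int) : Int :=
  if 1 ≤ y then liczOnes (PySem.Int.floordiv y 2) (acc + PySem.Int.mod y 2) else acc
termination_by y.toNat
decreasing_by
  have h2 : PySem.Int.floordiv y 2 = y / 2 := PySem.Int.floordiv_eq_ediv_of_pos (by omega)
  rw [h2]; omega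

-- second pass of Source B: number of binary digits (bit length)
def liczBits (y acc : Int) : Int :=
  if 1 ≤ y then liczBits (PySem.Int.floordiv y 2) (acc + 1) else acc
termination_by y.toNat
decreasing_by
  have h2 : PySem.Int.floordiv y 2 = y / 2 := PySem.Int.floordiv_eq_ediv_of_pos (by omega)
  rw [h2]; omega

def licz_alt (x : Int) : Int := 2 * liczOnes x 0 - liczBits x 0

-- ===== PRECONDITION & SPEC =====
-- Pre_ excludes x ≤ 0, on which Python A raises RecursionError (and B's loops return a
-- value unrelated to A, which never returns there).
def Pre_licz (x : Int) : Prop := 1 ≤ x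
instance (x : Int) : Decidable (Pre_licz x) := by unfold Pre_licz; infer_instance
def pvWitness_licz : Int := (5)

def Spec_licz (x : Int) (out : Int) : Prop := out = licz_alt x
instance (x : Int) (out : Int) : Decidable (Spec_licz x out) := by unfold Spec_licz; infer_instance

-- ===== CLAIM (what is proved, stated in full; the proofs are below) =====
def Claim_equal_licz : Prop := ∀ (x : Int), Dom_licz x → Pre_licz x → Spec_licz x (licz x)

-- ===== LEMMAS AND PROOFS =====

-- unfolding lemmas for the two passes
theorem liczOnes_neg (y acc : Int) (h : ¬ 1 ≤ y) : liczOnes y acc = acc := by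
  rw [liczOnes]; simp [h]

theorem liczOnes_pos (y acc : Int) (h : 1 ≤ y) :
    liczOnes y acc = liczOnes (y / 2) (acc + y % 2) := by
  rw [liczOnes]
  simp [h]

theorem liczBits_neg (y acc : Int) (h : ¬ 1 ≤ y) : liczBits y acc = acc := by
  rw [liczBits]; simp [h]

theorem liczBits_pos (y acc : Int) (h : 1 ≤ y) :
    liczBits y acc = liczBits (y / 2) (acc + 1) := by
  rw [liczBits]
  simp [h]

-- accumulator shift for the first pass
theorem liczOnes_acc (n : Nat) (y acc : Int) (hn : y.toNat ≤ n) :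
    liczOnes y acc = acc + liczOnes y 0 := by
  induction n generalizing y acc with
  | zero =>
    have h : ¬ 1 ≤ y := by omega
    rw [liczOnes_neg _ _ h, liczOnes_neg _ _ h]; ring
  | succ n ih =>
    by_cases h : 1 ≤ y
    · have hlt : (y / 2).toNat ≤ n := by omega
      rw [liczOnes_pos _ _ h, liczOnes_pos _ _ h]
      simp only [zero_add]
      rw [ih (y / 2) (acc + y % 2) hlt, ih (y / 2) (y % 2) hlt]
      ring
    · rw [liczOnes_neg _ _ h, liczOnes_neg _ _ h]; ring

-- accumulator shift for the second pass
theorem liczBits_acc (n : Nat) (y acc : Int) (hn : y.toNat ≤ n) :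
    liczBits y acc = acc + liczBits y 0 := by
  induction n generalizing y acc with
  | zero =>
    have h : ¬ 1 ≤ y := by omega
    rw [liczBits_neg _ _ h, liczBits_neg _ _ h]; ring
  | succ n ih =>
    by_cases h : 1 ≤ y
    · have hlt : (y / 2).toNat ≤ n := by omega
      rw [liczBits_pos _ _ h, liczBits_pos _ _ h]
      simp only [zero_add]
      rw [ih (y / 2) (acc + 1) hlt, ih (y / 2) 1 hlt]
      ring
    · rw [liczBits_neg _ _ h, liczBits_neg _ _ h]; ring

-- the closed form: A's walk equals 2*ones - bits on x ≥ 1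
theorem licz_eq_two_ones_sub_bits (n : Nat) (x : Int) (hx : 1 ≤ x) (hn : x.toNat ≤ n) :
    licz x = 2 * liczOnes x 0 - liczBits x 0 := by
  induction n generalizing x with
  | zero => omega
  | succ n ih =>
    by_cases h1 : x = 1
    · subst h1
      rw [licz, liczOnes_pos _ _ (by omega), liczBits_pos _ _ (by omega),
        liczOnes_neg _ _ (by omega), liczBits_neg _ _ (by omega)]
      norm_num
    · have hx2 : 1 ≤ x / 2 := by omega
      have hlt : (x / 2).toNat ≤ n := by omega
      have h2 : PySem.Int.floordiv x 2 = x / 2 := PySem.Int.floordiv_eq_ediv_of_pos (by omega)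
      have hm : PySem.Int.mod x 2 = x % 2 := PySem.Int.mod_eq_emod_of_pos (by omega)
      rw [licz]
      simp only [h1, if_false, dif_neg (show ¬ x ≤ 0 by omega), h2, hm]
      rw [liczOnes_pos _ _ hx, liczBits_pos _ _ hx]
      simp only [zero_add]
      rw [liczOnes_acc n (x / 2) (x % 2) hlt, liczBits_acc n (x / 2) 1 hlt,
        ih _ hx2 hlt]
      have hmod : x % 2 = 0 ∨ x % 2 = 1 := by omega
      rcases hmod with hmod | hmod <;> simp [hmod] <;> ring

-- ===== VERDICT (by name: the statement is the Claim_ definition above) =====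
theorem licz_spec : Claim_equal_licz := by
  intro x _ hx
  unfold Spec_licz licz_alt
  exact licz_eq_two_ones_sub_bits x.toNat x hx (le_refl _)
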